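-- pv_equiv track=rewrite | github.com/All-Hands-AI/OpenHands | evaluation/swe_bench/scripts/eval/convert_od_output_to_swe_json.py | process_git_patch
-- ===== SOURCE A (Python) =====
-- def process_git_patch(patch):
--     if not patch.strip():
--         # skip empty patches
--         return ''
--
--     patch = patch.replace('\r\n', '\n')
--     # There might be some weird characters at the beginning of the patch
--     # due to some OpenDevin inference command outputs
--
--     # FOR EXAMPLE:
--     # git diff --no-color --cached 895f28f9cbed817c00ab68770433170d83132d90
--     # [A[C[C[C[C[C[C[C[C[C[C[C[C[C[C[C[C[C[C[C[C[C[C[C[C[C[C[C[C[C[C[C[C[C[C[C[C[C[C[C[C[C[C[C[C[C[C[C[C[C[C[C[C[C[C[C[C[C[C[C[C[C[C[C[C[C[C[C[C[C[C[C[C[C[C[C[C[C[C[C[K0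
--     # diff --git a/django/db/models/sql/.backup.query.py b/django/db/models/sql/.backup.query.py
--     # new file mode 100644
--     # index 0000000000..fc13db5948
--
--     # We "find" the first line that starts with "diff" and then we remove lines before it
--     lines = patch.split('\n')
--     for i, line in enumerate(lines):
--         if line.startswith('diff --git'):
--             patch = '\n'.join(lines[i:])
--             break
--
--     patch = patch.rstrip() + '\n'  # Make sure the last line ends with a newline
--     return patch
-- ===== SOURCE B (Python) =====
-- def process_git_patch(patch):
--     if not patch.strip():
--         # skip empty patches
--         return ''
--
--     patch = patch.replace('\r\n', '\n')
--     # Cut the noise before the diff directly on the string: the first line that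
--     # starts with "diff --git" begins either at position 0 or right after a '\n'.
--     if not patch.startswith('diff --git'):
--         i = patch.find('\ndiff --git')
--         if i != -1:
--             patch = patch[i + 1:]
--
--     return patch.rstrip() + '\n'
-- ===== Notes on version B (the rewrite author's own statement) =====
-- stated objective: simpler
-- what changed: Instead of splitting the patch into a line list, enumerating it and rejoining the tail, B locates the cut point with a single substring search ('diff --git' at position 0, else the first occurrence of '\ndiff --git') and slices the raw string there.
import Mathlib
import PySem

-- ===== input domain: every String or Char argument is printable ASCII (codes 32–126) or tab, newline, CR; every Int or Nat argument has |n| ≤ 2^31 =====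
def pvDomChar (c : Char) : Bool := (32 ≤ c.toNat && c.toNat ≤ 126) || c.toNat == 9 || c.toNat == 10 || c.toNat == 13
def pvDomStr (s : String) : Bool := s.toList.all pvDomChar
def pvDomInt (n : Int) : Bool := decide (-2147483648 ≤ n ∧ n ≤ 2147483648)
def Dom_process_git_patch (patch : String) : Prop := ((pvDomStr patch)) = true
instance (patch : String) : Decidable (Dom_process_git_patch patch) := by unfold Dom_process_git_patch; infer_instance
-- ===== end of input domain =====

-- B replaces A's split-into-lines / enumerate / rejoin pass by a single substring
-- search on the raw string ('diff --git' at position 0, else first '\ndiff --git')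
-- and a slice; objective: simpler (same linear cost).

-- ===== PORT A =====
-- the `for i, line in enumerate(lines): if line.startswith('diff --git'): patch = '\n'.join(lines[i:]); break` loop
def aLoop (patch : String) (lines : List String) : List (Int × String) → String
  | [] => patch
  | (i, line) :: rest =>
    if PySem.Str.startswith line "diff --git"
    then PySem.Str.join "\n" (PySem.List.slice lines (some i) none)
    else aLoop patch lines rest

def process_git_patch (patch : String) : String :=
  if PySem.Str.strip patch = "" then ""
  else
    let patch := PySem.Str.replace patch "\r\n" "\n"
    -- patch.split('\n'): the separator is non-empty, so split? never returns none
    let lines := (PySem.Str.split? patch "\n").getD []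
    let patch := aLoop patch lines (PySem.List.enumerate lines)
    PySem.Str.rstrip patch ++ "\n"

-- ===== PORT B =====
def process_git_patch_alt (patch : String) : String :=
  if PySem.Str.strip patch = "" then ""
  else
    let patch := PySem.Str.replace patch "\r\n" "\n"
    let patch :=
      if PySem.Str.startswith patch "diff --git" then patch
      else
        let i := PySem.Str.find patch "\ndiff --git"
        if i = -1 then patch else PySem.Str.slice patch (some (i + 1)) none
    PySem.Str.rstrip patch ++ "\n"

-- ===== PRECONDITION & SPEC =====
def Spec_process_git_patch (patch : String) (out : String) : Prop := out = process_git_patch_alt patch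
instance (patch : String) (out : String) : Decidable (Spec_process_git_patch patch out) := by unfold Spec_process_git_patch; infer_instance

-- ===== CLAIM (what is proved, stated in full; the proofs are below) =====
def Claim_equal_process_git_patch : Prop := ∀ (patch : String), Dom_process_git_patch patch → Spec_process_git_patch patch (process_git_patch patch)

-- ===== LEMMAS AND PROOFS =====

-- "diff --git" as a list of characters
def Pd : List Char := ['d','i','f','f',' ','-','-','g','i','t']

-- reference single-pass split on '\n'
def mySplit : List Char → List (List Char)
  | [] => [[]]
  | c :: r =>
    if c = '\n' then [] :: mySplit r
    else
      match mySplit r with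
      | [] => [[c]]
      | h :: t => (c :: h) :: t

theorem mySplit_ne_nil (l : List Char) : mySplit l ≠ [] := by
  cases l with
  | nil => simp [mySplit]
  | cons c r =>
    simp only [mySplit]
    split_ifs with h
    · simp
    · cases mySplit r <;> simp

theorem splitOn_go_eq (l : List Char) : ∀ (fuel : Nat) (cur : List Char) (acc : List (List Char)),
    l.length < fuel →
    PySem.Chars.splitOn.go ['\n'] fuel l cur acc
      = acc.reverse ++ (mySplit l).modifyHead (cur.reverse ++ ·) := by
  induction l with
  | nil =>
    intro fuel cur acc h
    match fuel with
    | fuel + 1 => simp [PySem.Chars.splitOn.go, mySplit]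
  | cons c r ih =>
    intro fuel cur acc h
    match fuel with
    | fuel + 1 =>
      rw [PySem.Chars.splitOn.go]
      by_cases hc : c = '\n'
      · subst hc
        have hpre : List.isPrefixOf ['\n'] ('\n' :: r) = true := by
          simp
        simp only [hpre, if_true, List.length_cons, List.length_nil, Nat.zero_add,
          List.drop_succ_cons, List.drop_zero]
        rw [ih fuel [] (cur.reverse :: acc) (by simp at h; omega)]
        simp [mySplit]
        cases mySplit r <;> simp
      · have hpre : List.isPrefixOf ['\n'] (c :: r) = false := by
          simp only [Bool.eq_false_iff, ne_eq, List.isPrefixOf_iff_prefix, List.cons_prefix_cons]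
          intro hh; exact hc hh.1.symm
        simp only [hpre]
        rw [ih fuel (c :: cur) acc (by simp at h; omega)]
        simp only [mySplit, hc, if_false]
        cases hms : mySplit r with
        | nil => exact absurd hms (mySplit_ne_nil r)
        | cons hneq t => simp

theorem splitOn_eq_mySplit (l : List Char) : PySem.Chars.splitOn l ['\n'] = mySplit l := by
  rw [PySem.Chars.splitOn, splitOn_go_eq l (l.length + 1) [] [] (by omega)]
  cases hms : mySplit l with
  | nil => exact absurd hms (mySplit_ne_nil l)
  | cons h t => simp

theorem mySplit_no_nl (a : List Char) (h : '\n' ∉ a) : mySplit a = [a] := by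
  induction a with
  | nil => simp [mySplit]
  | cons c r ih =>
    simp only [List.mem_cons, not_or] at h
    have hc : ¬ c = '\n' := fun hh => h.1 hh.symm
    simp only [mySplit, if_neg hc, ih h.2]

theorem mySplit_append (a r : List Char) (h : '\n' ∉ a) :
    mySplit (a ++ '\n' :: r) = a :: mySplit r := by
  induction a with
  | nil => simp [mySplit]
  | cons c t ih =>
    simp only [List.mem_cons, not_or] at h
    have hc : ¬ c = '\n' := fun hh => h.1 hh.symm
    simp only [List.cons_append, mySplit, if_neg hc, ih h.2]

theorem join_mySplit (l : List Char) : PySem.Chars.join ['\n'] (mySplit l) = l := by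
  induction l with
  | nil => simp [mySplit, PySem.Chars.join, List.intercalate]
  | cons c r ih =>
    simp only [mySplit]
    split_ifs with hc
    · subst hc
      cases hms : mySplit r with
      | nil => exact absurd hms (mySplit_ne_nil r)
      | cons h t =>
        rw [hms] at ih
        simp [PySem.Chars.join, List.intercalate] at ih ⊢
        simp [ih]
    · cases hms : mySplit r with
      | nil => exact absurd hms (mySplit_ne_nil r)
      | cons h t =>
        rw [hms] at ih
        simp [PySem.Chars.join, List.intercalate] at ih ⊢
        cases t with
        | nil => simp at ih ⊢; simp [ih]
        | cons h2 t2 => simp at ih ⊢; simpa using ih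

-- a prefix containing no '\n' of (a ++ '\n' :: r), with '\n' ∉ a, is a prefix of a
theorem prefix_of_no_nl (P a r : List Char) (hP : '\n' ∉ P) (_ha : '\n' ∉ a)
    (h : P <+: a ++ '\n' :: r) : P <+: a := by
  by_cases hlen : P.length ≤ a.length
  · obtain ⟨t, ht⟩ := h
    have hP' : P = List.take P.length a := by
      have h1 := congrArg (List.take P.length) ht
      rw [List.take_left' rfl, List.take_append_of_le_length hlen] at h1
      exact h1
    exact List.prefix_iff_eq_take.mpr hP'
  · exfalso
    apply hP
    have hget : P[a.length]? = some '\n' := by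
      obtain ⟨t, ht⟩ := h
      have h1 : (P ++ t)[a.length]? = some '\n' := by rw [ht]; simp
      rwa [List.getElem?_append_left (by omega)] at h1
    exact List.mem_of_getElem? hget

theorem infix_of_prefix_drop {sub l : List Char} {j : Nat} (h : sub <+: l.drop j) :
    sub <:+: l :=
  h.isInfix.trans (List.drop_suffix j l).isInfix

theorem find_eq_of_first (sub l : List Char) (j : Nat)
    (h1 : sub <+: l.drop j) (h2 : ∀ i < j, ¬ sub <+: l.drop i) :
    PySem.Chars.find l sub = (j : Int) := by
  have hinf : sub <:+: l := infix_of_prefix_drop h1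
  have hnn : 0 ≤ PySem.Chars.find l sub := (PySem.Chars.find_nonneg_iff _ _).mpr hinf
  obtain ⟨hp, hmin⟩ := PySem.Chars.find_spec hnn
  have heq : (PySem.Chars.find l sub).toNat = j := by
    rcases Nat.lt_trichotomy (PySem.Chars.find l sub).toNat j with h | h | h
    · exact absurd hp (h2 _ h)
    · exact h
    · exact absurd h1 (hmin j h)
  omega

theorem find_eq_neg_of (sub l : List Char) (h : ∀ j : Nat, ¬ sub <+: l.drop j) :
    PySem.Chars.find l sub = -1 := by
  rw [PySem.Chars.find_eq_neg_one_iff]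
  rintro ⟨s, t, hst⟩
  apply h s.length
  have hd : List.drop s.length l = sub ++ t := by
    rw [← hst, List.append_assoc, List.drop_left' rfl]
  exact hd ▸ ⟨t, rfl⟩

-- the two cut computations on characters
def cutA (l : List Char) : Option (List Char) :=
  (List.findIdx? (fun a => Pd.isPrefixOf a) (mySplit l)).map
    (fun i => PySem.Chars.join ['\n'] ((mySplit l).drop i))

def cutB (l : List Char) : Option (List Char) :=
  if Pd.isPrefixOf l then some l
  else if PySem.Chars.find l ('\n' :: Pd) = -1 then none
       else some (l.drop ((PySem.Chars.find l ('\n' :: Pd)).toNat + 1))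

theorem nl_not_mem_Pd : '\n' ∉ Pd := by decide

theorem drop_decomp (a r : List Char) (k : Nat) :
    (a ++ '\n' :: r).drop (a.length + 1 + k) = r.drop k := by
  rw [List.drop_append, List.drop_eq_nil_of_le (by omega), List.nil_append,
    show a.length + 1 + k - a.length = k + 1 by omega, List.drop_succ_cons]

theorem not_prefix_inside (a r : List Char) (ha : '\n' ∉ a) (i : Nat) (hi : i < a.length) :
    ¬ ('\n' :: Pd) <+: (a ++ '\n' :: r).drop i := by
  intro hpre
  apply ha
  obtain ⟨t, ht⟩ := hpre
  have h0 : ((a ++ '\n' :: r).drop i)[0]? = some '\n' := by rw [← ht]; rfl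
  rw [List.getElem?_drop] at h0
  have hg : a[i + 0]? = some '\n' := by
    rwa [List.getElem?_append_left (by omega)] at h0
  exact List.mem_of_getElem? hg

theorem core_eq_aux : ∀ (n : Nat) (l : List Char), l.length ≤ n → cutA l = cutB l := by
  intro n
  induction n with
  | zero =>
    intro l hl
    have : l = [] := List.eq_nil_of_length_eq_zero (by omega)
    subst this
    decide
  | succ n ih =>
    intro l hl
    by_cases hmem : '\n' ∈ l
    case neg =>
      have hms : mySplit l = [l] := mySplit_no_nl l hmem
      have hfind : PySem.Chars.find l ('\n' :: Pd) = -1 := by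
        apply find_eq_neg_of
        intro j hj
        exact hmem (List.mem_of_mem_drop (hj.subset (by simp)))
      rw [cutA, cutB, hms, hfind]
      by_cases hp : Pd.isPrefixOf l = true
      · simp [hp, List.findIdx?_cons, PySem.Chars.join, List.intercalate]
      · simp only [Bool.not_eq_true] at hp
        simp [hp, List.findIdx?_cons]
    case pos =>
      -- decompose l at the first newline
      obtain ⟨a, r, rfl, ha⟩ : ∃ a r, l = a ++ '\n' :: r ∧ '\n' ∉ a := by
        refine ⟨l.takeWhile (fun c => c != '\n'), (l.dropWhile (fun c => c != '\n')).tail, ?_, ?_⟩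
        · have hne : l.dropWhile (fun c => c != '\n') ≠ [] := by
            rw [ne_eq, List.dropWhile_eq_nil_iff]
            intro hall
            exact absurd (hall '\n' hmem) (by simp)
          cases hD : l.dropWhile (fun c => c != '\n') with
          | nil => exact absurd hD hne
          | cons c t =>
            have hc : c = '\n' := by
              have := List.head_dropWhile_not (fun c => c != '\n') (l := l) (by rw [hD]; simp)
              simp only [hD, List.head_cons] at this
              simpa using this
            subst hc
            conv_lhs => rw [← List.takeWhile_append_dropWhile (p := fun c => c != '\n') (l := l)]
            rw [hD]
            simp
        · intro hmem'
          have := List.mem_takeWhile_imp hmem'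
          simp at this
      have hler : r.length ≤ n := by
        simp [List.length_append] at hl
        omega
      have hms : mySplit (a ++ '\n' :: r) = a :: mySplit r := mySplit_append a r ha
      by_cases hpa : Pd.isPrefixOf a = true
      · -- first line matches: both sides return the whole string
        have hpl : Pd.isPrefixOf (a ++ '\n' :: r) = true := by
          rw [List.isPrefixOf_iff_prefix] at hpa ⊢
          exact hpa.trans (List.prefix_append a _)
        rw [cutA, cutB, hms, if_pos hpl, List.findIdx?_cons, if_pos hpa]
        simp only [Option.map_some, List.drop_zero, ← hms, join_mySplit]
      · have hpl : Pd.isPrefixOf (a ++ '\n' :: r) = false := by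
          rw [Bool.eq_false_iff, ne_eq, List.isPrefixOf_iff_prefix]
          intro hpre
          exact hpa (by rw [List.isPrefixOf_iff_prefix]; exact prefix_of_no_nl Pd a r nl_not_mem_Pd ha hpre)
        have hA : cutA (a ++ '\n' :: r) = cutA r := by
          rw [cutA, cutA, hms, List.findIdx?_cons, if_neg (by simp [hpa])]
          cases List.findIdx? (fun a => Pd.isPrefixOf a) (mySplit r) with
          | none => simp
          | some j => simp
        rw [hA, ih r hler, cutB, cutB]
        have hplP : ¬ (Pd.isPrefixOf (a ++ '\n' :: r) = true) := by simp [hpl]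
        by_cases hb1 : Pd.isPrefixOf r = true
        · -- match at the start of r: first '\ndiff --git' occurrence is at a.length
          rw [if_pos hb1, if_neg hplP]
          have hfind : PySem.Chars.find (a ++ '\n' :: r) ('\n' :: Pd) = (a.length : Int) := by
            apply find_eq_of_first
            · rw [List.drop_left' rfl, List.cons_prefix_cons]
              exact ⟨rfl, List.isPrefixOf_iff_prefix.mp hb1⟩
            · exact fun i hi => not_prefix_inside a r ha i hi
          rw [hfind]
          rw [if_neg (show ¬((a.length : Int) = -1) by omega)]
          have : (a.length : Int).toNat + 1 = a.length + 1 + 0 := by omega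
          rw [this, drop_decomp]
          simp
        · by_cases hb2 : PySem.Chars.find r ('\n' :: Pd) = -1
          · -- no occurrence anywhere
            rw [if_neg hb1, if_pos hb2, if_neg hplP]
            have hnone : ∀ j : Nat, ¬ ('\n' :: Pd) <+: (a ++ '\n' :: r).drop j := by
              intro j hj
              rcases Nat.lt_trichotomy j a.length with hlt | heq | hgt
              · exact not_prefix_inside a r ha j hlt hj
              · subst heq
                rw [List.drop_left' rfl, List.cons_prefix_cons] at hj
                exact absurd (List.isPrefixOf_iff_prefix.mpr hj.2) (by simp [hb1])
              · have hj' : ('\n' :: Pd) <+: r.drop (j - a.length - 1) := by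
                  have : j = a.length + 1 + (j - a.length - 1) := by omega
                  rwa [this, drop_decomp] at hj
                rw [PySem.Chars.find_eq_neg_one_iff] at hb2
                exact hb2 (infix_of_prefix_drop hj')
            rw [if_pos (find_eq_neg_of _ _ hnone)]

          · -- first occurrence inside r at index j; in l it is at a.length + 1 + j
            rw [if_neg hb1, if_neg hb2, if_neg hplP]
            have hnn : 0 ≤ PySem.Chars.find r ('\n' :: Pd) := by
              have := PySem.Chars.neg_one_le_find r ('\n' :: Pd)
              omega
            obtain ⟨hp, hmin⟩ := PySem.Chars.find_spec hnn
            set j : Nat := (PySem.Chars.find r ('\n' :: Pd)).toNat with hj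
            have hfind : PySem.Chars.find (a ++ '\n' :: r) ('\n' :: Pd) = ((a.length + 1 + j : Nat) : Int) := by
              apply find_eq_of_first
              · rw [drop_decomp]; exact hp
              · intro i hi
                rcases Nat.lt_trichotomy i a.length with hlt | heq | hgt
                · exact not_prefix_inside a r ha i hlt
                · subst heq
                  intro hpre
                  rw [List.drop_left' rfl, List.cons_prefix_cons] at hpre
                  exact absurd (List.isPrefixOf_iff_prefix.mpr hpre.2) (by simp [hb1])
                · intro hpre
                  have hi' : i = a.length + 1 + (i - a.length - 1) := by omega
                  rw [hi', drop_decomp] at hpre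
                  exact hmin (i - a.length - 1) (by omega) hpre
            rw [hfind, if_neg (show ¬(((a.length + 1 + j : Nat) : Int) = -1) by omega)]
            have h1 : ((a.length + 1 + j : Nat) : Int).toNat + 1 = a.length + 1 + (j + 1) := by omega
            rw [h1, drop_decomp]

theorem core_eq (l : List Char) : cutA l = cutB l := core_eq_aux l.length l le_rfl

-- A's loop over enumerate equals findIdx? over the line list
theorem aLoop_enum (patch : String) (lines : List String) :
    ∀ (xs : List String) (k : Nat), xs = lines.drop k →
    aLoop patch lines (PySem.List.enumerate xs (k : Int)) =
      (match List.findIdx? (fun s => PySem.Str.startswith s "diff --git") xs with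
       | none => patch
       | some j => PySem.Str.join "\n" (lines.drop (k + j))) := by
  intro xs
  induction xs with
  | nil => intro k _; simp [PySem.List.enumerate, aLoop]
  | cons x t ih =>
    intro k hk
    have henum : PySem.List.enumerate (x :: t) (k : Int)
        = ((k : Int), x) :: PySem.List.enumerate t ((k : Int) + 1) := by
      simp [PySem.List.enumerate]
    rw [henum]
    simp only [aLoop]
    by_cases hx : PySem.Str.startswith x "diff --git" = true
    · rw [if_pos hx, List.findIdx?_cons, if_pos hx]
      rw [PySem.List.slice_from lines (by positivity)]
      simp
    · rw [if_neg hx, List.findIdx?_cons, if_neg hx]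
      have ht : t = lines.drop (k + 1) := by
        have := congrArg List.tail hk
        simpa [List.tail_drop] using this
      have hcast : ((k : Int) + 1) = ((k + 1 : Nat) : Int) := by push_cast; ring
      rw [hcast, ih (k + 1) ht]
      cases List.findIdx? (fun s => PySem.Str.startswith s "diff --git") t with
      | none => simp
      | some j => simp only [Option.map_some]; congr 2; omega

-- the split of s on '\n' at the String level
theorem split?_eq (s : String) : ∃ L : List String,
    PySem.Str.split? s "\n" = some L ∧ L.map String.toList = mySplit s.toList := by
  have h := PySem.Str.split?_map s "\n"
  have h2 : PySem.Chars.split? s.toList ("\n" : String).toList = some (mySplit s.toList) := by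
    rw [PySem.Chars.split?]
    rw [if_neg (by decide)]
    rw [show ("\n" : String).toList = ['\n'] from rfl, splitOn_eq_mySplit]
  rw [h2] at h
  cases hs : PySem.Str.split? s "\n" with
  | none => rw [hs] at h; simp at h
  | some L =>
    rw [hs] at h
    simp only [Option.map_some, Option.some.injEq] at h
    exact ⟨L, rfl, h⟩

-- middle part of A equals cutA
theorem aMid_eq (s : String) :
    (aLoop s ((PySem.Str.split? s "\n").getD [])
        (PySem.List.enumerate ((PySem.Str.split? s "\n").getD []))).toList
      = ((cutA s.toList).getD s.toList) := by
  obtain ⟨L, hL, hmap⟩ := split?_eq s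
  rw [hL]
  simp only [Option.getD_some]
  have h0 : L = L.drop 0 := rfl
  have := aLoop_enum s L L 0 h0
  rw [show ((0 : Nat) : Int) = 0 from rfl] at this
  rw [this]
  have hfi : List.findIdx? (fun a => Pd.isPrefixOf a) (mySplit s.toList)
      = List.findIdx? (fun s => PySem.Str.startswith s "diff --git") L := by
    rw [← hmap, List.findIdx?_map]
    rfl
  rw [cutA, hfi]
  cases hidx : List.findIdx? (fun s => PySem.Str.startswith s "diff --git") L with
  | none => simp
  | some j =>
    simp only [Option.map_some, Option.getD_some, Nat.zero_add]
    rw [PySem.Str.toList_join, ← hmap, List.map_drop]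
    rfl

-- middle part of B equals cutB
theorem bMid_eq (s : String) :
    (if PySem.Str.startswith s "diff --git" then s
     else if PySem.Str.find s "\ndiff --git" = -1 then s
          else PySem.Str.slice s (some (PySem.Str.find s "\ndiff --git" + 1)) none).toList
      = ((cutB s.toList).getD s.toList) := by
  have hsw : PySem.Str.startswith s "diff --git" = Pd.isPrefixOf s.toList := rfl
  have hfd : PySem.Str.find s "\ndiff --git" = PySem.Chars.find s.toList ('\n' :: Pd) := rfl
  by_cases h1 : Pd.isPrefixOf s.toList = true
  · rw [hsw, if_pos h1, cutB, if_pos h1]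
    rfl
  · have h1' : ¬ (PySem.Str.startswith s "diff --git" = true) := by rw [hsw]; simp [h1]
    rw [if_neg h1', cutB, if_neg h1]
    by_cases h2 : PySem.Chars.find s.toList ('\n' :: Pd) = -1
    · have h2' : PySem.Str.find s "\ndiff --git" = -1 := by rw [hfd]; exact h2
      rw [if_pos h2', if_pos h2]
      rfl
    · have h2' : ¬ (PySem.Str.find s "\ndiff --git" = -1) := by rw [hfd]; exact h2
      rw [if_neg h2', if_neg h2, hfd]
      have hnn : 0 ≤ PySem.Chars.find s.toList ('\n' :: Pd) := by
        have := PySem.Chars.neg_one_le_find s.toList ('\n' :: Pd)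
        omega
      rw [PySem.Str.toList_slice, PySem.Chars.slice_eq_listSlice,
        PySem.List.slice_from s.toList (by omega)]
      simp only [Option.getD_some]
      congr 1
      omega

-- ===== VERDICT (by name: the statement is the Claim_ definition above) =====
theorem process_git_patch_spec : Claim_equal_process_git_patch := by
  intro patch _
  unfold Spec_process_git_patch process_git_patch process_git_patch_alt
  by_cases h : PySem.Str.strip patch = ""
  · rw [if_pos h, if_pos h]
  · rw [if_neg h, if_neg h]
    apply String.toList_inj.mp
    simp only [String.toList_append, PySem.Str.toList_rstrip]
    rw [aMid_eq, bMid_eq, core_eq]
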